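-- pv_equiv track=rewrite | github.com/JinSon12/AlgorithmsPractice | 백준/실버5/SEP_5_그룹단어체커.py | checkGroupWord
-- ===== SOURCE A (Python) =====
-- def checkGroupWord(word):
--     d = {}
--
--     for i in range(len(word)):
--         if word[i] not in d:
--             d[word[i]] = i
--         else:
--             if d[word[i]] == i - 1:
--                 d[word[i]] = i
--             else:
--                 return 0
--
--     return 1
-- ===== SOURCE B (Python) =====
-- def checkGroupWord(word):
--     collapsed = []
--     for c in word:
--         if not collapsed or collapsed[-1] != c:
--             collapsed.append(c)
--     return 1 if len(collapsed) == len(set(collapsed)) else 0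
-- ===== Notes on version B (the rewrite author's own statement) =====
-- stated objective: idiomatic
-- what changed: Replaces A's single pass with last-index dictionary bookkeeping by a two-phase shape: first collapse consecutive runs into their representative characters, then declare the word a group-word iff that collapsed list has no duplicates (compared against its set).
import Mathlib
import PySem

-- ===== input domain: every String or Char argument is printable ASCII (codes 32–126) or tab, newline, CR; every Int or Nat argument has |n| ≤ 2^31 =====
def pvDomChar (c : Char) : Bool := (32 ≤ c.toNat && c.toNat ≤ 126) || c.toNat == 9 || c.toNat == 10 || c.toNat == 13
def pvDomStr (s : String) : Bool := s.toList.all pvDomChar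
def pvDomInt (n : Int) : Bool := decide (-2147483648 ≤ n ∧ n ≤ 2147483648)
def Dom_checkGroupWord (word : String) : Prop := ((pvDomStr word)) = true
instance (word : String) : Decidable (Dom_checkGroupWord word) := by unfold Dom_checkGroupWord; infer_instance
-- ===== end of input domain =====

-- B replaces A's single-pass last-index dictionary bookkeeping by a two-phase shape:
-- collapse consecutive runs, then test the collapsed list for duplicates (idiomatic, same cost).


-- ===== PORT A =====
-- the for-loop over range(len(word)) with early return 0: word[i] is the head of the
-- remaining character list, i the running index, d the dictionary of last positions
def checkGroupWordLoop : List Char → Int → PySem.Dict Char Int → Int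
  | [], _, _ => 1
  | c :: rest, i, d =>
    if !(d.contains c) then
      checkGroupWordLoop rest (i + 1) (d.insert c i)
    else
      if d.getD c 0 = i - 1 then
        checkGroupWordLoop rest (i + 1) (d.insert c i)
      else 0

def checkGroupWord (word : String) : Int :=
  checkGroupWordLoop word.toList 0 PySem.Dict.empty

-- ===== PORT B =====
-- phase 1: 'for c in word: if not collapsed or collapsed[-1] != c: collapsed.append(c)'
-- phase 2: 'return 1 if len(collapsed) == len(set(collapsed)) else 0'
def checkGroupWord_alt (word : String) : Int :=
  let collapsed := word.toList.foldl
    (fun acc c => if acc.isEmpty || acc.getLast? != some c then acc ++ [c] else acc) []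
  if collapsed.length = (PySem.Set.ofList collapsed).length then 1 else 0

-- ===== PRECONDITION & SPEC =====
def Spec_checkGroupWord (word : String) (out : Int) : Prop := out = checkGroupWord_alt word
instance (word : String) (out : Int) : Decidable (Spec_checkGroupWord word out) := by unfold Spec_checkGroupWord; infer_instance

-- ===== CLAIM (what is proved, stated in full; the proofs are below) =====
def Claim_equal_checkGroupWord : Prop := ∀ (word : String), Dom_checkGroupWord word → Spec_checkGroupWord word (checkGroupWord word)

-- ===== LEMMAS AND PROOFS =====

-- run-collapse of the remaining characters, given the representative of the current run
def collapseFrom : Option Char → List Char → List Char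
  | _, [] => []
  | prev, c :: rest => if some c = prev then collapseFrom prev rest else c :: collapseFrom (some c) rest

-- abstract form of A's loop: prev = current run's character, seen = all characters seen so far
def refLoop : List Char → Option Char → List Char → Int
  | [], _, _ => 1
  | c :: rest, prev, seen =>
    if some c = prev then refLoop rest prev seen
    else if c ∈ seen then 0
    else refLoop rest (some c) (c :: seen)

lemma loopA_eq_refLoop (cs : List Char) : ∀ (i : Int) (d : PySem.Dict Char Int)
    (prev : Option Char) (seen : List Char),
    (∀ c, d.contains c = true ↔ c ∈ seen) →
    (∀ c, d.get? c = some (i - 1) ↔ some c = prev) →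
    (∀ c v, d.get? c = some v → v ≤ i - 1) →
    (∀ p, prev = some p → p ∈ seen) →
    checkGroupWordLoop cs i d = refLoop cs prev seen := by
  induction cs with
  | nil => intros; rfl
  | cons c rest ih =>
    intro i d prev seen H1 H2 H3 H4
    by_cases hc : d.contains c = true
    · -- c already in the dict, hence c ∈ seen
      have hseen : c ∈ seen := (H1 c).1 hc
      obtain ⟨v, hv⟩ : ∃ v, d.get? c = some v := by
        have h := PySem.Dict.contains_eq_isSome_get? (d := d) (k := c)
        rw [hc] at h
        exact Option.isSome_iff_exists.mp h.symm
      have hgd : d.getD c 0 = v := PySem.Dict.getD_of_get?_eq_some d 0 hv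
      by_cases hp : some c = prev
      · -- current run continues
        have hvi : v = i - 1 := by
          have h := (H2 c).2 hp; rw [hv] at h; exact Option.some_inj.mp h
        rw [show checkGroupWordLoop (c :: rest) i d
              = checkGroupWordLoop rest (i + 1) (d.insert c i) from by
            simp [checkGroupWordLoop, hc, hgd, hvi]]
        rw [show refLoop (c :: rest) prev seen = refLoop rest prev seen from by
            simp [refLoop, hp]]
        apply ih
        · intro c'
          rw [PySem.Dict.contains_insert]
          constructor
          · intro h
            rcases Bool.or_eq_true_iff.mp h with h | h
            · exact (beq_iff_eq.mp h) ▸ hseen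
            · exact (H1 c').1 h
          · intro h; exact Bool.or_eq_true_iff.mpr (Or.inr ((H1 c').2 h))
        · intro c'
          rw [PySem.Dict.get?_insert]
          split_ifs with he
          · subst he
            constructor
            · intro _; exact hp
            · intro _; congr 1; omega
          · have hi : i + 1 - 1 = i := by omega
            rw [hi]
            constructor
            · intro h; have := H3 c' i h; omega
            · intro h; exact absurd (Option.some_inj.mp (h.trans hp.symm)) he
        · intro c' v' h
          rw [PySem.Dict.get?_insert] at h
          split_ifs at h with he
          · have : v' = i := Option.some_inj.mp h.symm; omega
          · have := H3 c' v' h; omega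
        · exact H4
      · -- c seen but not the current run: A returns 0 because d[c] ≠ i-1
        have hvne : v ≠ i - 1 := fun h => hp ((H2 c).1 (h ▸ hv))
        rw [show checkGroupWordLoop (c :: rest) i d = 0 from by
            simp [checkGroupWordLoop, hc, hgd, hvne]]
        rw [show refLoop (c :: rest) prev seen = 0 from by
            simp [refLoop, hp, hseen]]
    · -- fresh character: new run starts
      have hcf : d.contains c = false := by simpa using hc
      have hns : c ∉ seen := fun h => hc ((H1 c).2 h)
      have hp : some c ≠ prev := fun h => hns (H4 c h.symm)
      rw [show checkGroupWordLoop (c :: rest) i d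
            = checkGroupWordLoop rest (i + 1) (d.insert c i) from by
          simp [checkGroupWordLoop, hcf]]
      rw [show refLoop (c :: rest) prev seen = refLoop rest (some c) (c :: seen) from by
          simp [refLoop, hp, hns]]
      apply ih
      · intro c'
        rw [PySem.Dict.contains_insert]
        simp only [List.mem_cons]
        constructor
        · intro h
          rcases Bool.or_eq_true_iff.mp h with h | h
          · exact Or.inl (beq_iff_eq.mp h)
          · exact Or.inr ((H1 c').1 h)
        · rintro (h | h)
          · exact Bool.or_eq_true_iff.mpr (Or.inl (beq_iff_eq.mpr h))
          · exact Bool.or_eq_true_iff.mpr (Or.inr ((H1 c').2 h))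
      · intro c'
        rw [PySem.Dict.get?_insert]
        split_ifs with he
        · subst he
          constructor
          · intro _; rfl
          · intro _; congr 1; omega
        · have hi : i + 1 - 1 = i := by omega
          rw [hi]
          constructor
          · intro h; have := H3 c' i h; omega
          · intro h; exact absurd (Option.some_inj.mp h.symm).symm he
      · intro c' v' h
        rw [PySem.Dict.get?_insert] at h
        split_ifs at h with he
        · have : v' = i := Option.some_inj.mp h.symm; omega
        · have := H3 c' v' h; omega
      · intro p hp'
        exact List.mem_cons.mpr (Or.inl (Option.some_inj.mp hp'.symm))

lemma refLoop_eq (cs : List Char) : ∀ (prev : Option Char) (seen : List Char),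
    refLoop cs prev seen =
      if (collapseFrom prev cs).Nodup ∧ ∀ c ∈ collapseFrom prev cs, c ∉ seen then 1 else 0 := by
  induction cs with
  | nil => intro prev seen; simp [refLoop, collapseFrom]
  | cons c rest ih =>
    intro prev seen
    by_cases hp : some c = prev
    · simp only [refLoop, collapseFrom, if_pos hp]
      exact ih prev seen
    · by_cases hs : c ∈ seen
      · simp only [refLoop, collapseFrom, if_neg hp, if_pos hs]
        rw [if_neg]
        rintro ⟨-, h⟩
        exact h c (List.mem_cons_self) hs
      · simp only [refLoop, collapseFrom, if_neg hp, if_neg hs]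
        rw [ih (some c) (c :: seen)]
        apply if_congr _ rfl rfl
        constructor
        · rintro ⟨hnd, hall⟩
          refine ⟨List.nodup_cons.mpr ⟨fun h => (hall c h (List.mem_cons_self)), hnd⟩, ?_⟩
          intro x hx
          rcases List.mem_cons.mp hx with h | h
          · exact h ▸ hs
          · exact fun hxs => hall x h (List.mem_cons.mpr (Or.inr hxs))
        · rintro ⟨hnd, hall⟩
          have hnd' := List.nodup_cons.mp hnd
          refine ⟨hnd'.2, ?_⟩
          intro x hx hmem
          rcases List.mem_cons.mp hmem with h | h
          · exact hnd'.1 (h ▸ hx)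
          · exact hall x (List.mem_cons.mpr (Or.inr hx)) h

lemma foldB_eq (cs : List Char) : ∀ (acc : List Char),
    cs.foldl (fun acc c => if acc.isEmpty || acc.getLast? != some c then acc ++ [c] else acc) acc
      = acc ++ collapseFrom acc.getLast? cs := by
  induction cs with
  | nil => intro acc; simp [collapseFrom]
  | cons c rest ih =>
    intro acc
    rcases List.eq_nil_or_concat acc with hacc | ⟨l, a, rfl⟩
    · subst hacc
      simp only [List.foldl_cons, List.isEmpty_nil, Bool.true_or, if_true, List.nil_append]
      rw [ih [c]]
      simp [collapseFrom]
    · simp only [List.concat_eq_append]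
      by_cases he : a = c
      · subst he
        have hcond : ((l ++ [a]).isEmpty || (l ++ [a]).getLast? != some a) = false := by
          simp
        simp only [List.foldl_cons, hcond, Bool.false_eq_true, if_false]
        rw [ih (l ++ [a])]
        simp [collapseFrom]
      · have hcond : ((l ++ [a]).isEmpty || (l ++ [a]).getLast? != some c) = true := by
          simp [he]
        simp only [List.foldl_cons, hcond, if_true]
        rw [ih ((l ++ [a]) ++ [c])]
        have h1 : ((l ++ [a]) ++ [c]).getLast? = some c := List.getLast?_concat
        have h2 : (l ++ [a]).getLast? = some a := List.getLast?_concat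
        rw [h1, h2]
        have hne : some c ≠ some a := fun h => he (Option.some_inj.mp h).symm
        simp [collapseFrom, hne, List.append_assoc]

lemma length_ofList_eq_iff (l : List Char) :
    l.length = (PySem.Set.ofList l).length ↔ l.Nodup := by
  constructor
  · intro h
    by_contra hnd
    suffices hlt : (PySem.Set.ofList l).length < l.length by omega
    clear h
    induction l with
    | nil => exact absurd List.nodup_nil hnd
    | cons x xs ih =>
      rw [PySem.Set.ofList_cons]
      simp only [List.length_cons]
      by_cases hx : x ∈ PySem.Set.ofList xs
      · have hlt : ((PySem.Set.ofList xs).discard x).length < (PySem.Set.ofList xs).length := by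
          unfold PySem.Set.discard
          apply List.length_filter_lt_length_iff_exists.mpr
          exact ⟨x, hx, by simp⟩
        have := PySem.Set.length_ofList_le (xs := xs)
        omega
      · have hxs : x ∉ xs := fun h => hx ((PySem.Set.mem_ofList xs x).mpr h)
        have hnd' : ¬ xs.Nodup := fun h => hnd (List.nodup_cons.mpr ⟨hxs, h⟩)
        have hle : ((PySem.Set.ofList xs).discard x).length ≤ (PySem.Set.ofList xs).length := by
          unfold PySem.Set.discard
          exact List.length_filter_le _ _
        have := ih hnd'
        omega
  · intro h
    rw [PySem.Set.ofList_eq_self_of_nodup l h]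

lemma checkGroupWord_eq (word : String) : checkGroupWord word = checkGroupWord_alt word := by
  unfold checkGroupWord checkGroupWord_alt
  rw [loopA_eq_refLoop word.toList 0 PySem.Dict.empty none []
    (by intro c; simp [PySem.Dict.contains_empty])
    (by intro c; simp [PySem.Dict.get?_empty])
    (by intro c v h; simp [PySem.Dict.get?_empty] at h)
    (by intro p h; cases h)]
  rw [refLoop_eq]
  have hf := foldB_eq word.toList []
  rw [List.getLast?_nil, List.nil_append] at hf
  simp only [hf]
  apply if_congr _ rfl rfl
  constructor
  · rintro ⟨hnd, -⟩; exact (length_ofList_eq_iff _).mpr hnd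
  · intro h; exact ⟨(length_ofList_eq_iff _).mp h, by simp⟩

-- ===== VERDICT (by name: the statement is the Claim_ definition above) =====
theorem checkGroupWord_spec : Claim_equal_checkGroupWord := by
  intro word _
  unfold Spec_checkGroupWord
  exact checkGroupWord_eq word
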